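-- pv_equiv track=rewrite | github.com/bednius/traffic_flow_prediction | prediciton_module/main.py | accumulate_min_max
-- ===== SOURCE A (Python) =====
-- import collections
--
-- def accumulate_min_max(l):
--     a = []
--     max_d = collections.defaultdict(int)
--     min_d = collections.defaultdict(int)
--     for key, number in l:
--         if key not in a:
--             a.append(key)
--         max_d[key] = max(number, max_d[key])
--         min_d[key] = min(number, 5000 if min_d[key] == 0 else min_d[key])
--     return [(f, min_d[f], max_d[f]) for f in a if f[1] % 15 == 14]
-- ===== SOURCE B (Python) =====
-- def accumulate_min_max(l):
--     # Two-pass decomposition: group numbers per key (insertion-ordered), then reduce each group.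
--     groups = {}
--     for key, number in l:
--         groups.setdefault(key, []).append(number)
--     result = []
--     for key, nums in groups.items():
--         if key[1] % 15 == 14:
--             mx = 0
--             for n in nums:
--                 mx = max(n, mx)
--             m = 0
--             for n in nums:
--                 m = min(n, 5000 if m == 0 else m)
--             result.append((key, m, mx))
--     return result
-- ===== Notes on version B (the rewrite author's own statement) =====
-- stated objective: faster
-- what changed: A interleaves three structures (a first-appearance key list with an O(k) membership scan per element plus two scalar defaultdicts, then a final comprehension); B first groups the numbers per key into one insertion-ordered dict of lists and then reduces each group separately (max fold with baseline 0, the order-dependent zero-reset/5000-cap min fold), filtering keys with key[1] % 15 == 14.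
import Mathlib
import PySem

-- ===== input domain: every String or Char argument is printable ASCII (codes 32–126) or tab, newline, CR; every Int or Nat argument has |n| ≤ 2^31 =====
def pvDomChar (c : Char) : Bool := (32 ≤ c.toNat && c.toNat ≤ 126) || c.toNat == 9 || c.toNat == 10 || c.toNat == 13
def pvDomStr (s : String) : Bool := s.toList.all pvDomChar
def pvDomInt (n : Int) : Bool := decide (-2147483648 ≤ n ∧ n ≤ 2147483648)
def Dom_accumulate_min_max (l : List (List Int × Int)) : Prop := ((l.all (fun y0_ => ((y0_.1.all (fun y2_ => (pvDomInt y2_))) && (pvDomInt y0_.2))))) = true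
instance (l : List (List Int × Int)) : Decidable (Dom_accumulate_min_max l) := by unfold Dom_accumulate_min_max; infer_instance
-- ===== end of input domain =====

-- B regroups A's interleaved three-structure loop into a group-by-key pass followed by per-key
-- reductions (same values, same order); equivalence is about the return value only.

-- ===== PORT A =====
-- `f[1]` is ported as (pyGet? f 1).getD 0; exact under Pre_ (every key has length ≥ 2), which is
-- precisely where the Python returns instead of raising IndexError.
def accumulate_min_max (l : List (List Int × Int)) : List (List Int × Int × Int) :=
  let st := l.foldl
    (fun (st : List (List Int) × PySem.Dict (List Int) Int × PySem.Dict (List Int) Int) p =>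
      ((if p.1 ∈ st.1 then st.1 else st.1 ++ [p.1]),
       st.2.1.insert p.1 (max p.2 (st.2.1.getD p.1 0)),
       st.2.2.insert p.1 (min p.2 (if st.2.2.getD p.1 0 == 0 then (5000 : Int) else st.2.2.getD p.1 0))))
    ([], PySem.Dict.empty, PySem.Dict.empty)
  (st.1.filter (fun f => PySem.Int.mod ((PySem.List.pyGet? f 1).getD 0) 15 == 14)).map
    (fun f => (f, st.2.2.getD f 0, st.2.1.getD f 0))

-- ===== PORT B =====
def accumulate_min_max_alt (l : List (List Int × Int)) : List (List Int × Int × Int) :=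
  let groups := l.foldl (fun (d : PySem.Dict (List Int) (List Int)) p => d.modify p.1 [] (· ++ [p.2]))
    PySem.Dict.empty
  groups.items.foldl
    (fun res kv =>
      if PySem.Int.mod ((PySem.List.pyGet? kv.1 1).getD 0) 15 == 14 then
        res ++ [(kv.1,
                 kv.2.foldl (fun m n => min n (if m == 0 then (5000 : Int) else m)) 0,
                 kv.2.foldl (fun mx n => max n mx) 0)]
      else res) []

-- ===== PRECONDITION & SPEC =====
-- Pre_ excludes exactly the inputs on which Python A raises IndexError at `f[1]`: a key of length < 2.
def Pre_accumulate_min_max (l : List (List Int × Int)) : Prop := ∀ p ∈ l, 2 ≤ p.1.length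
instance (l : List (List Int × Int)) : Decidable (Pre_accumulate_min_max l) := by
  unfold Pre_accumulate_min_max; infer_instance
def pvWitness_accumulate_min_max : (List (List Int × Int)) := [([0, 14], 3), ([1, 29], -2)]
def Spec_accumulate_min_max (l : List (List Int × Int)) (out : List (List Int × Int × Int)) : Prop := out = accumulate_min_max_alt l
instance (l : List (List Int × Int)) (out : List (List Int × Int × Int)) : Decidable (Spec_accumulate_min_max l out) := by unfold Spec_accumulate_min_max; infer_instance

-- ===== CLAIM (what is proved, stated in full; the proofs are below) =====
def Claim_equal_accumulate_min_max : Prop := ∀ (l : List (List Int × Int)), Dom_accumulate_min_max l → Pre_accumulate_min_max l → Spec_accumulate_min_max l (accumulate_min_max l)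

-- ===== LEMMAS AND PROOFS =====

-- A fold of a triple whose components are updated independently is the triple of the three folds.
theorem pv_foldl_triple {α β γ δ : Type}
    (F : α → δ → α) (G : β → δ → β) (H : γ → δ → γ) (l : List δ) (x : α) (y : β) (z : γ) :
    l.foldl (fun st p => (F st.1 p, G st.2.1 p, H st.2.2 p)) (x, y, z)
      = (l.foldl F x, l.foldl G y, l.foldl H z) := by
  induction l generalizing x y z with
  | nil => rfl
  | cons p l ih => simp [List.foldl, ih]

-- The scalar-accumulating dict loop, read at key k, is the fold of g over k's numbers in order.
theorem pv_getD_foldl_insert_comb (g : Int → Int → Int) (l : List (List Int × Int))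
    (d : PySem.Dict (List Int) Int) (k : List Int) :
    (l.foldl (fun d p => d.insert p.1 (g p.2 (d.getD p.1 0))) d).getD k 0
      = ((l.filter (fun p => p.1 == k)).map (·.2)).foldl (fun m n => g n m) (d.getD k 0) := by
  induction l generalizing d with
  | nil => rfl
  | cons p l ih =>
    by_cases h : p.1 = k
    · subst h
      simp [List.foldl, ih, PySem.Dict.getD_insert_self]
    · have hb : (p.1 == k) = false := by simp [h]
      simp [List.foldl, ih, hb, PySem.Dict.getD_insert, Ne.symm h]

theorem accumulate_min_max_eq (l : List (List Int × Int)) :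
    accumulate_min_max l = accumulate_min_max_alt l := by
  simp only [accumulate_min_max, accumulate_min_max_alt]
  -- decompose A's triple fold
  rw [pv_foldl_triple
    (F := fun (a : List (List Int)) (p : List Int × Int) => if p.1 ∈ a then a else a ++ [p.1])
    (G := fun (d : PySem.Dict (List Int) Int) (p : List Int × Int) =>
      d.insert p.1 (max p.2 (d.getD p.1 0)))
    (H := fun (d : PySem.Dict (List Int) Int) (p : List Int × Int) =>
      d.insert p.1 (min p.2 (if d.getD p.1 0 == 0 then (5000 : Int) else d.getD p.1 0)))]
  -- B: the dict of groups
  set groups := l.foldl (fun (d : PySem.Dict (List Int) (List Int)) p => d.modify p.1 [] (· ++ [p.2]))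
    PySem.Dict.empty with hg
  have hnd : groups.keys.Nodup := by
    rw [hg]
    exact PySem.Dict.nodup_keys_foldl_modify_key l (·.1) [] (fun _ p => (· ++ [p.2]))
      PySem.Dict.empty (by simp [PySem.Dict.keys_empty])
  have hkeys : groups.keys = PySem.Set.update [] (l.map (·.1)) := by
    rw [hg]
    have := PySem.Dict.keys_foldl_modify_key (d := (PySem.Dict.empty : PySem.Dict (List Int) (List Int)))
      (l := l) (key := (·.1)) (d0 := []) (f := fun _ p => (· ++ [p.2]))
    simpa [PySem.Dict.keys_empty] using this
  have hgetD : ∀ k, groups.getD k [] = (l.filter (fun p => p.1 == k)).map (·.2) := by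
    intro k
    rw [hg]
    simpa [PySem.Dict.getD_empty] using
      PySem.Dict.getD_foldl_modify_append (l := l)
        (d := (PySem.Dict.empty : PySem.Dict (List Int) (List Int))) (c := k)
  -- B's output loop as filter-then-map over the items
  rw [PySem.List.foldl_append_if
    (p := fun kv : List Int × List Int => PySem.Int.mod ((PySem.List.pyGet? kv.1 1).getD 0) 15 == 14)
    (f := fun kv : List Int × List Int =>
      (kv.1, kv.2.foldl (fun m n => min n (if m == 0 then (5000 : Int) else m)) 0,
       kv.2.foldl (fun mx n => max n mx) 0))]
  rw [PySem.Dict.items_eq_map_keys groups hnd []]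
  rw [List.filter_map, List.map_map]
  -- A's key list is the same dedup of the keys
  have ha : l.foldl (fun a p => if p.1 ∈ a then a else a ++ [p.1]) [] = groups.keys := by
    rw [hkeys]
    rw [PySem.Set.update_map_eq_foldl_add]
    apply PySem.List.foldl_congr_mem
    intro acc p _
    rw [PySem.Set.add_eq_ite]
  simp only [ha, List.nil_append]
  apply List.map_congr_left
  intro k hk
  simp only [Function.comp]
  rw [pv_getD_foldl_insert_comb (fun n m => min n (if m == 0 then (5000 : Int) else m)),
      pv_getD_foldl_insert_comb (fun n m => max n m)]
  simp [hgetD, PySem.Dict.getD_empty]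

-- ===== VERDICT (by name: the statement is the Claim_ definition above) =====
theorem accumulate_min_max_spec : Claim_equal_accumulate_min_max := by
  intro l _ _
  unfold Spec_accumulate_min_max
  exact accumulate_min_max_eq l
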